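-- pv_equiv track=rewrite | github.com/lll889745/LaTex | src/semantic.py | _preprocess_latex
-- ===== SOURCE A (Python) =====
-- def _preprocess_latex(latex: str) -> str:
--     """
--     预处理 LaTeX 代码以便于解析
--
--     Args:
--         latex: 原始 LaTeX
--
--     Returns:
--         处理后的 LaTeX
--     """
--     # 替换一些常见的变体
--     replacements = [
--         (r'\cdot', r' \cdot '),
--         (r'\times', r' \times '),
--         (r'\div', r' / '),
--         (r'\pm', r' \pm '),
--     ]
--
--     for old, new in replacements:
--         latex = latex.replace(old, new)
--
--     return latex.strip()
-- ===== SOURCE B (Python) =====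
-- def _preprocess_latex(latex: str) -> str:
--     """Single left-to-right scan with a dispatch table instead of four sequential full-string replace passes."""
--     table = {
--         '\\cdot': ' \\cdot ',
--         '\\times': ' \\times ',
--         '\\div': ' / ',
--         '\\pm': ' \\pm ',
--     }
--     out = []
--     i, n = 0, len(latex)
--     while i < n:
--         for tok, rep in table.items():
--             if latex.startswith(tok, i):
--                 out.append(rep)
--                 i += len(tok)
--                 break
--         else:
--             out.append(latex[i])
--             i += 1
--     return ''.join(out).strip()
-- ===== Notes on version B (the rewrite author's own statement) =====
-- stated objective: alternative
-- what changed: Replaces A's four sequential full-string replace passes by a single left-to-right scan that dispatches each matched operator token through a lookup table (the tokens are pairwise non-overlapping and the replacement texts never create new token occurrences, so one pass returns the same string).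
import Mathlib
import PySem

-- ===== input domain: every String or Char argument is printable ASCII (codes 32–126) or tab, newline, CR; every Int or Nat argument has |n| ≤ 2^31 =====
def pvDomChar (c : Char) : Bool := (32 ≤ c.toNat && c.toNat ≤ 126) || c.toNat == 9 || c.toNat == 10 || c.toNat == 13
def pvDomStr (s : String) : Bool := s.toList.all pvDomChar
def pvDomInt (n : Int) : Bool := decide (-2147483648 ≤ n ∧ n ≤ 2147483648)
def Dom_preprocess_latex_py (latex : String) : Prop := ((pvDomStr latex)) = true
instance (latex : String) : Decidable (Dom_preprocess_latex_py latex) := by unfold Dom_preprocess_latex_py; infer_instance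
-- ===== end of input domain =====

-- B replaces A's four sequential full-string replace passes by one left-to-right scan
-- with a first-match dispatch table (objective: alternative, same return value).

-- ===== PORT A =====
def preprocess_latex_py (latex : String) : String :=
  let replacements : List (String × String) :=
    [("\\cdot", " \\cdot "), ("\\times", " \\times "), ("\\div", " / "), ("\\pm", " \\pm ")]
  PySem.Str.strip (replacements.foldl (fun s p => PySem.Str.replace s p.1 p.2) latex)

-- ===== PORT B =====
-- one pass over the characters; at each position the first matching token of the
-- dispatch table (same order as Source B's dict) is emitted as its replacement
def pvScan : List Char → List Char
  | [] => []
  | c :: t =>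
    if "\\cdot".toList.isPrefixOf (c :: t) then " \\cdot ".toList ++ pvScan (t.drop 4)
    else if "\\times".toList.isPrefixOf (c :: t) then " \\times ".toList ++ pvScan (t.drop 5)
    else if "\\div".toList.isPrefixOf (c :: t) then " / ".toList ++ pvScan (t.drop 3)
    else if "\\pm".toList.isPrefixOf (c :: t) then " \\pm ".toList ++ pvScan (t.drop 2)
    else c :: pvScan t
termination_by l => l.length
decreasing_by all_goals simp [List.length_drop]

def preprocess_latex_py_alt (latex : String) : String :=
  PySem.Str.strip (String.ofList (pvScan latex.toList))

-- ===== PRECONDITION & SPEC =====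
def Spec_preprocess_latex_py (latex : String) (out : String) : Prop := out = preprocess_latex_py_alt latex
instance (latex : String) (out : String) : Decidable (Spec_preprocess_latex_py latex out) := by unfold Spec_preprocess_latex_py; infer_instance

-- ===== CLAIM (what is proved, stated in full; the proofs are below) =====
def Claim_equal_preprocess_latex_py : Prop := ∀ (latex : String), Dom_preprocess_latex_py latex → Spec_preprocess_latex_py latex (preprocess_latex_py latex)

-- ===== LEMMAS AND PROOFS =====

theorem pvPrefixAppend {old x b : List Char} (h : old <+: x ++ b) : old <+: x ∨ x <+: old := by
  rcases le_or_gt old.length x.length with hle | hgt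
  · left
    have h2 : old <+: (x ++ b).take old.length := by
      rw [List.prefix_take_iff]; exact ⟨h, le_rfl⟩
    rw [List.take_append_of_le_length hle] at h2
    exact h2.trans (List.take_prefix _ _)
  · right
    obtain ⟨r, hr⟩ := h
    have h3 := congrArg (List.take x.length) hr
    rw [List.take_left, List.take_append_of_le_length (by omega)] at h3
    exact h3.symm ▸ List.take_prefix _ _

-- pvRep old new is Python's str.replace for a nonempty pattern, in directly recursive form
def pvRep (old new : List Char) (l : List Char) : List Char :=
  PySem.Chars.replace.go old new l.length l []

theorem pvGo_acc (old new : List Char) (fuel : Nat) :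
    ∀ (l acc : List Char),
      PySem.Chars.replace.go old new fuel l acc = acc.reverse ++ PySem.Chars.replace.go old new fuel l [] := by
  induction fuel with
  | zero => intro l acc; simp [PySem.Chars.replace.go]
  | succ f ih =>
    intro l acc
    cases l with
    | nil => simp [PySem.Chars.replace.go]
    | cons c t =>
      simp only [PySem.Chars.replace.go]
      by_cases h : old.isPrefixOf (c :: t)
      · rw [if_pos h, if_pos h, ih _ (new.reverse ++ acc), ih _ (new.reverse ++ [])]
        simp
      · rw [if_neg h, if_neg h, ih _ (c :: acc), ih _ (c :: [])]
        simp

theorem pvGo_fuel (old new : List Char) (hold : old ≠ []) :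
    ∀ (n : Nat) (l : List Char), l.length ≤ n →
      ∀ (f₁ f₂ : Nat) (acc : List Char), l.length ≤ f₁ → l.length ≤ f₂ →
        PySem.Chars.replace.go old new f₁ l acc = PySem.Chars.replace.go old new f₂ l acc := by
  intro n
  induction n with
  | zero =>
    intro l hl f₁ f₂ acc _ _
    have : l = [] := List.length_eq_zero_iff.mp (Nat.le_zero.mp hl)
    subst this
    cases f₁ <;> cases f₂ <;> simp [PySem.Chars.replace.go]
  | succ m ih =>
    intro l hl f₁ f₂ acc h₁ h₂
    cases l with
    | nil => cases f₁ <;> cases f₂ <;> simp [PySem.Chars.replace.go]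
    | cons c t =>
      obtain ⟨g₁, rfl⟩ : ∃ g, f₁ = g + 1 := ⟨f₁ - 1, by simp at h₁; omega⟩
      obtain ⟨g₂, rfl⟩ : ∃ g, f₂ = g + 1 := ⟨f₂ - 1, by simp at h₂; omega⟩
      simp only [PySem.Chars.replace.go]
      have hol : 1 ≤ old.length := List.length_pos_iff.mpr hold
      simp only [List.length_cons] at hl h₁ h₂
      by_cases h : old.isPrefixOf (c :: t)
      · rw [if_pos h, if_pos h]
        exact ih _ (by simp; omega) _ _ _ (by simp; omega) (by simp; omega)
      · rw [if_neg h, if_neg h]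
        exact ih _ (by omega) _ _ _ (by omega) (by omega)

theorem pvRep_nil (old new : List Char) : pvRep old new [] = [] := by
  simp [pvRep, PySem.Chars.replace.go]

theorem pvRep_cons (old new : List Char) (hold : old ≠ []) (c : Char) (t : List Char) :
    pvRep old new (c :: t) =
      if old.isPrefixOf (c :: t) then new ++ pvRep old new (List.drop old.length (c :: t))
      else c :: pvRep old new t := by
  have hol : 1 ≤ old.length := List.length_pos_iff.mpr hold
  unfold pvRep
  simp only [List.length_cons]
  rw [show (t.length + 1) = Nat.succ t.length from rfl]
  simp only [PySem.Chars.replace.go]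
  by_cases h : old.isPrefixOf (c :: t)
  · rw [if_pos h, if_pos h, pvGo_acc]
    have hlen : (List.drop old.length (c :: t)).length ≤ t.length := by
      simp [List.length_drop]; omega
    rw [pvGo_fuel old new hold (List.drop old.length (c :: t)).length _ le_rfl _ _ _ hlen le_rfl]
    simp
  · rw [if_neg h, if_neg h, pvGo_acc]
    simp

theorem pvReplace_eq_rep (old new l : List Char) (hold : old ≠ []) :
    PySem.Chars.replace l old new = pvRep old new l := by
  rw [PySem.Chars.replace]
  simp [List.isEmpty_iff, hold, pvRep]

theorem pvRep_self_append (old new b : List Char) (hold : old ≠ []) :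
    pvRep old new (old ++ b) = new ++ pvRep old new b := by
  cases old with
  | nil => exact absurd rfl hold
  | cons o o' =>
    rw [List.cons_append, pvRep_cons _ _ hold]
    rw [if_pos (List.isPrefixOf_iff_prefix.mpr (by exact ⟨b, by simp⟩))]
    simp

theorem pvRep_append (old new : List Char) (hold : old ≠ []) :
    ∀ (a b : List Char),
      (∀ i, i < a.length → ¬(List.drop i a <+: old) ∧ ¬(old <+: List.drop i a)) →
      pvRep old new (a ++ b) = a ++ pvRep old new b := by
  intro a
  induction a with
  | nil => intro b _; rfl
  | cons x a' ih =>
    intro b hsafe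
    rw [List.cons_append, pvRep_cons _ _ hold]
    have hnp : ¬ old.isPrefixOf (x :: (a' ++ b)) := by
      rw [List.isPrefixOf_iff_prefix]
      intro h
      rcases pvPrefixAppend (x := x :: a') (b := b) h with h' | h'
      · exact (hsafe 0 (by simp)).2 (by simpa using h')
      · exact (hsafe 0 (by simp)).1 (by simpa using h')
    rw [if_neg hnp, ih b (fun i hi => by simpa using hsafe (i + 1) (by simpa using hi))]
    simp

-- a (nonempty suffix-of-token) prefix of the output of pvRep was already a prefix of the input,
-- provided no such piece interacts with the replacement text
theorem pvRep_prefix_pull (old new tok : List Char) (hold : old ≠ [])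
    (H : ∀ p ∈ tok.tails, p ≠ [] → ¬(p <+: new) ∧ ¬(new <+: p)) :
    ∀ (n : Nat) (l p : List Char), l.length ≤ n → p <:+ tok → p ≠ [] →
      p <+: pvRep old new l → p <+: l := by
  intro n
  induction n with
  | zero =>
    intro l p hl _ hpne hpre
    have : l = [] := List.length_eq_zero_iff.mp (Nat.le_zero.mp hl)
    subst this
    rw [pvRep_nil] at hpre
    exact absurd (List.prefix_nil.mp hpre) hpne
  | succ m ih =>
    intro l p hl hsuf hpne hpre
    cases l with
    | nil =>
      rw [pvRep_nil] at hpre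
      exact absurd (List.prefix_nil.mp hpre) hpne
    | cons c t =>
      rw [pvRep_cons _ _ hold] at hpre
      by_cases h : old.isPrefixOf (c :: t)
      · rw [if_pos h] at hpre
        rcases pvPrefixAppend hpre with h' | h'
        · exact absurd h' (H p ((List.mem_tails _ _).mpr hsuf) hpne).1
        · exact absurd h' (H p ((List.mem_tails _ _).mpr hsuf) hpne).2
      · rw [if_neg h] at hpre
        cases p with
        | nil => exact absurd rfl hpne
        | cons q p' =>
          obtain ⟨rfl, hp'⟩ := List.cons_prefix_cons.mp hpre
          cases hp'emp : p' with
          | nil => exact List.cons_prefix_cons.mpr ⟨rfl, List.nil_prefix⟩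
          | cons _ _ =>
            rw [← hp'emp]
            have hsuf' : p' <:+ tok := (List.suffix_cons q p').trans hsuf
            have := ih t p' (by simpa using Nat.lt_succ_iff.mp (by simpa using hl)) hsuf'
              (by simp [hp'emp]) (hp'emp ▸ hp')
            exact List.cons_prefix_cons.mpr ⟨rfl, this⟩

-- pushing "is not a prefix" through one pvRep pass
theorem pvNotPrefixLift (old new tok : List Char) (hold : old ≠ [])
    (H : ∀ p ∈ tok.tails, p ≠ [] → ¬(p <+: new) ∧ ¬(new <+: p))
    (c : Char) (t : List Char) (hno : ¬ tok <+: c :: t) :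
    ¬ tok <+: c :: pvRep old new t := by
  intro hpre
  cases tok with
  | nil => exact hno List.nil_prefix
  | cons q tok' =>
    obtain ⟨rfl, hp'⟩ := List.cons_prefix_cons.mp hpre
    cases htk : tok' with
    | nil => exact hno (by simp [htk])
    | cons _ _ =>
      have hsuf' : tok' <:+ q :: tok' := List.suffix_cons q tok'
      have := pvRep_prefix_pull old new (q :: tok') hold H t.length t tok' le_rfl hsuf'
        (by simp [htk]) hp'
      exact hno (List.cons_prefix_cons.mpr ⟨rfl, this⟩)

-- the four sequential passes of A equal the single scan of B
theorem pvMain : ∀ (n : Nat) (l : List Char), l.length ≤ n →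
    pvRep "\\pm".toList " \\pm ".toList
      (pvRep "\\div".toList " / ".toList
        (pvRep "\\times".toList " \\times ".toList
          (pvRep "\\cdot".toList " \\cdot ".toList l))) = pvScan l := by
  intro n
  induction n with
  | zero =>
    intro l hl
    have : l = [] := List.length_eq_zero_iff.mp (Nat.le_zero.mp hl)
    subst this
    simp [pvRep_nil, pvScan]
  | succ m ih =>
    intro l hl
    cases l with
    | nil => simp [pvRep_nil, pvScan]
    | cons c t =>
      by_cases h1 : "\\cdot".toList.isPrefixOf (c :: t)
      · obtain ⟨rest, hrest⟩ := List.isPrefixOf_iff_prefix.mp h1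
        rw [← hrest]
        rw [pvRep_self_append _ _ _ (by decide)]
        rw [pvRep_append _ _ (by decide) _ _ (by decide)]
        rw [pvRep_append _ _ (by decide) _ _ (by decide)]
        rw [pvRep_append _ _ (by decide) _ _ (by decide)]
        have hlen : rest.length ≤ m := by
          have := congrArg List.length hrest
          simp at this hl ⊢; omega
        rw [ih rest hlen]
        conv_rhs => rw [show ("\\cdot".toList ++ rest : List Char) =
          '\\' :: ("cdot".toList ++ rest) from rfl]
        rw [pvScan]
        rw [if_pos (by rw [show ('\\' :: ("cdot".toList ++ rest) : List Char) =
          "\\cdot".toList ++ rest from rfl]; exact List.isPrefixOf_iff_prefix.mpr ⟨rest, rfl⟩)]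
        simp
      · by_cases h2 : "\\times".toList.isPrefixOf (c :: t)
        · obtain ⟨rest, hrest⟩ := List.isPrefixOf_iff_prefix.mp h2
          rw [← hrest]
          rw [pvRep_append _ _ (by decide) _ _ (by decide)]
          rw [pvRep_self_append _ _ _ (by decide)]
          rw [pvRep_append _ _ (by decide) _ _ (by decide)]
          rw [pvRep_append _ _ (by decide) _ _ (by decide)]
          have hlen : rest.length ≤ m := by
            have := congrArg List.length hrest
            simp at this hl ⊢; omega
          rw [ih rest hlen]
          conv_rhs => rw [show ("\\times".toList ++ rest : List Char) =
            '\\' :: ("times".toList ++ rest) from rfl]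
          rw [pvScan]
          rw [if_neg (by rw [show ('\\' :: ("times".toList ++ rest) : List Char) =
            "\\times".toList ++ rest from rfl]; rw [hrest]; exact h1)]
          rw [if_pos (by rw [show ('\\' :: ("times".toList ++ rest) : List Char) =
            "\\times".toList ++ rest from rfl]; exact List.isPrefixOf_iff_prefix.mpr ⟨rest, rfl⟩)]
          simp
        · by_cases h3 : "\\div".toList.isPrefixOf (c :: t)
          · obtain ⟨rest, hrest⟩ := List.isPrefixOf_iff_prefix.mp h3
            rw [← hrest]
            rw [pvRep_append _ _ (by decide) _ _ (by decide)]
            rw [pvRep_append _ _ (by decide) _ _ (by decide)]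
            rw [pvRep_self_append _ _ _ (by decide)]
            rw [pvRep_append _ _ (by decide) _ _ (by decide)]
            have hlen : rest.length ≤ m := by
              have := congrArg List.length hrest
              simp at this hl ⊢; omega
            rw [ih rest hlen]
            conv_rhs => rw [show ("\\div".toList ++ rest : List Char) =
              '\\' :: ("div".toList ++ rest) from rfl]
            rw [pvScan]
            rw [if_neg (by rw [show ('\\' :: ("div".toList ++ rest) : List Char) =
              "\\div".toList ++ rest from rfl]; rw [hrest]; exact h1)]
            rw [if_neg (by rw [show ('\\' :: ("div".toList ++ rest) : List Char) =
              "\\div".toList ++ rest from rfl]; rw [hrest]; exact h2)]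
            rw [if_pos (by rw [show ('\\' :: ("div".toList ++ rest) : List Char) =
              "\\div".toList ++ rest from rfl]; exact List.isPrefixOf_iff_prefix.mpr ⟨rest, rfl⟩)]
            simp
          · by_cases h4 : "\\pm".toList.isPrefixOf (c :: t)
            · obtain ⟨rest, hrest⟩ := List.isPrefixOf_iff_prefix.mp h4
              rw [← hrest]
              rw [pvRep_append _ _ (by decide) _ _ (by decide)]
              rw [pvRep_append _ _ (by decide) _ _ (by decide)]
              rw [pvRep_append _ _ (by decide) _ _ (by decide)]
              rw [pvRep_self_append _ _ _ (by decide)]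
              have hlen : rest.length ≤ m := by
                have := congrArg List.length hrest
                simp at this hl ⊢; omega
              rw [ih rest hlen]
              conv_rhs => rw [show ("\\pm".toList ++ rest : List Char) =
                '\\' :: ("pm".toList ++ rest) from rfl]
              rw [pvScan]
              rw [if_neg (by rw [show ('\\' :: ("pm".toList ++ rest) : List Char) =
                "\\pm".toList ++ rest from rfl]; rw [hrest]; exact h1)]
              rw [if_neg (by rw [show ('\\' :: ("pm".toList ++ rest) : List Char) =
                "\\pm".toList ++ rest from rfl]; rw [hrest]; exact h2)]
              rw [if_neg (by rw [show ('\\' :: ("pm".toList ++ rest) : List Char) =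
                "\\pm".toList ++ rest from rfl]; rw [hrest]; exact h3)]
              rw [if_pos (by rw [show ('\\' :: ("pm".toList ++ rest) : List Char) =
                "\\pm".toList ++ rest from rfl]; exact List.isPrefixOf_iff_prefix.mpr ⟨rest, rfl⟩)]
              simp
            · -- no token starts here: every pass keeps c and recurses on t
              have hl' : t.length ≤ m := by simpa using Nat.lt_succ_iff.mp (by simpa using hl)
              rw [pvRep_cons _ _ (by decide), if_neg h1]
              have h2' : ¬ "\\times".toList <+:
                  c :: pvRep "\\cdot".toList " \\cdot ".toList t :=
                pvNotPrefixLift _ _ _ (by decide) (by decide) c t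
                  (fun h => h2 (List.isPrefixOf_iff_prefix.mpr h))
              rw [pvRep_cons _ _ (by decide),
                if_neg (fun h => h2' (List.isPrefixOf_iff_prefix.mp h))]
              have h3a : ¬ "\\div".toList <+:
                  c :: pvRep "\\cdot".toList " \\cdot ".toList t :=
                pvNotPrefixLift _ _ _ (by decide) (by decide) c t
                  (fun h => h3 (List.isPrefixOf_iff_prefix.mpr h))
              have h3' : ¬ "\\div".toList <+:
                  c :: pvRep "\\times".toList " \\times ".toList
                    (pvRep "\\cdot".toList " \\cdot ".toList t) :=
                pvNotPrefixLift _ _ _ (by decide) (by decide) c _ h3a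
              rw [pvRep_cons _ _ (by decide),
                if_neg (fun h => h3' (List.isPrefixOf_iff_prefix.mp h))]
              have h4a : ¬ "\\pm".toList <+:
                  c :: pvRep "\\cdot".toList " \\cdot ".toList t :=
                pvNotPrefixLift _ _ _ (by decide) (by decide) c t
                  (fun h => h4 (List.isPrefixOf_iff_prefix.mpr h))
              have h4b : ¬ "\\pm".toList <+:
                  c :: pvRep "\\times".toList " \\times ".toList
                    (pvRep "\\cdot".toList " \\cdot ".toList t) :=
                pvNotPrefixLift _ _ _ (by decide) (by decide) c _ h4a
              have h4' : ¬ "\\pm".toList <+: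
                  c :: pvRep "\\div".toList " / ".toList
                    (pvRep "\\times".toList " \\times ".toList
                      (pvRep "\\cdot".toList " \\cdot ".toList t)) :=
                pvNotPrefixLift _ _ _ (by decide) (by decide) c _ h4b
              rw [pvRep_cons _ _ (by decide),
                if_neg (fun h => h4' (List.isPrefixOf_iff_prefix.mp h))]
              rw [ih t hl']
              rw [pvScan, if_neg h1, if_neg h2, if_neg h3, if_neg h4]

-- ===== VERDICT (by name: the statement is the Claim_ definition above) =====
theorem preprocess_latex_py_spec : Claim_equal_preprocess_latex_py := by
  intro latex _
  unfold Spec_preprocess_latex_py preprocess_latex_py preprocess_latex_py_alt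
  rw [← String.toList_inj]
  simp only [List.foldl, PySem.Str.toList_strip, PySem.Str.toList_replace, String.toList_ofList]
  congr 1
  rw [pvReplace_eq_rep _ _ _ (by decide), pvReplace_eq_rep _ _ _ (by decide),
    pvReplace_eq_rep _ _ _ (by decide), pvReplace_eq_rep _ _ _ (by decide)]
  exact pvMain latex.toList.length latex.toList le_rfl
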